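-- pv_equiv track=rewrite | github.com/rvekeria678/pythontutorial | lc/lc_2475.py | unequalTriplets
-- ===== SOURCE A (Python) =====
-- def unequalTriplets(nums: list[int]) -> int:
--     count = 0
--     d = {}
--     for i in range(len(nums)):
--         for j in range(i+1, len(nums)):
--             for k in range(j+1, len(nums)):
--                 if nums[i] != nums[j] and nums[j] != nums[k] and nums[i] != nums[k]:
--                     count += 1
--     return count
--
-- nums = [1,1,1,1,1]
-- ===== SOURCE B (Python) =====
-- def unequalTriplets(nums: list[int]) -> int:
--     # One pass: for each new element x, add the number of earlier distinct-valued
--     # pairs avoiding x; maintain running length, per-value counts and pair count.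
--     ans = 0
--     pairs = 0
--     n = 0
--     cnt = {}
--     for x in nums:
--         c = cnt.get(x, 0)
--         ans += pairs - c * (n - c)
--         pairs += n - c
--         cnt[x] = c + 1
--         n += 1
--     return ans
-- ===== Notes on version B (the rewrite author's own statement) =====
-- stated objective: faster
-- what changed: Replaced the O(n^3) triple nested index loop by a single pass that keeps per-value counts, the running length and a running count of distinct-valued pairs, adding for each new element the number of earlier distinct pairs avoiding its value.
import Mathlib
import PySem

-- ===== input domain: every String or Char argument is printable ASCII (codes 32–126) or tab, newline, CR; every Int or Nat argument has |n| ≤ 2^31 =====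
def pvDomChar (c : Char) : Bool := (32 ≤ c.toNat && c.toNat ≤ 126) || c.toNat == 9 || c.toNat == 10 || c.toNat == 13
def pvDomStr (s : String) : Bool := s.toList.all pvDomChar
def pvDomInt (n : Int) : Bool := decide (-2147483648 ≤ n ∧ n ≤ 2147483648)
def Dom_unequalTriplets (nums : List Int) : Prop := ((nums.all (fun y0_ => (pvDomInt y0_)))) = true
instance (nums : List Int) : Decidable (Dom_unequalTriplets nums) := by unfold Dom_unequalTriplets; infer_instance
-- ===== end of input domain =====

-- B replaces A's O(n^3) triple index loop by a single O(n) pass that keeps per-value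
-- counts and a running count of distinct-valued pairs (objective: faster, asymptotic).

-- ===== PORT A =====
-- literal transliteration of A's triple nested index loop; A's 'd = {}' is never read
-- or written afterwards, so it is omitted; nums[i]/nums[j]/nums[k] are always in range,
-- so pyGetD with default 0 is exact.
def unequalTriplets (nums : List Int) : Int :=
  (PySem.List.pyRange 0 (PySem.List.len nums) 1).foldl (fun count i =>
    (PySem.List.pyRange (i + 1) (PySem.List.len nums) 1).foldl (fun count j =>
      (PySem.List.pyRange (j + 1) (PySem.List.len nums) 1).foldl (fun count k =>
        if PySem.List.pyGetD nums i 0 ≠ PySem.List.pyGetD nums j 0 ∧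
           PySem.List.pyGetD nums j 0 ≠ PySem.List.pyGetD nums k 0 ∧
           PySem.List.pyGetD nums i 0 ≠ PySem.List.pyGetD nums k 0
        then count + 1 else count) count) count) 0

-- ===== PORT B =====
-- one pass over nums; state = (ans, pairs, n, cnt) exactly as in Source B
def unequalTriplets_alt (nums : List Int) : Int :=
  (nums.foldl
    (fun (st : Int × Int × Int × PySem.Dict Int Int) x =>
      let c := st.2.2.2.getD x 0
      (st.1 + (st.2.1 - c * (st.2.2.1 - c)),
       st.2.1 + (st.2.2.1 - c),
       st.2.2.1 + 1,
       st.2.2.2.insert x (c + 1)))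
    (0, 0, 0, PySem.Dict.empty)).1

-- ===== PRECONDITION & SPEC =====
def Spec_unequalTriplets (nums : List Int) (out : Int) : Prop := out = unequalTriplets_alt nums
instance (nums : List Int) (out : Int) : Decidable (Spec_unequalTriplets nums out) := by unfold Spec_unequalTriplets; infer_instance

-- ===== CLAIM (what is proved, stated in full; the proofs are below) =====
def Claim_equal_unequalTriplets : Prop := ∀ (nums : List Int), Dom_unequalTriplets nums → Spec_unequalTriplets nums (unequalTriplets nums)

-- ===== LEMMAS AND PROOFS =====

-- pvE x t = number of pairs (a before b in t) with x ≠ a, a ≠ b, x ≠ b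
def pvE (x : Int) : List Int → Int
  | [] => 0
  | a :: t => (if x ≠ a then ((t.countP fun b => decide (a ≠ b ∧ x ≠ b)) : Int) else 0) + pvE x t

-- pvD t = number of pairs (a before b in t) with a ≠ b
def pvD : List Int → Int
  | [] => 0
  | a :: t => ((t.countP fun b => decide (a ≠ b)) : Int) + pvD t

-- pvT t = number of index triples i<j<k with pairwise distinct values
def pvT : List Int → Int
  | [] => 0
  | a :: t => pvE a t + pvT t

lemma countP_ne (x : Int) (p : List Int) :
    ((p.countP fun b => decide (x ≠ b)) : Int) = p.length - p.count x := by
  induction p with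
  | nil => simp
  | cons a t ih =>
    rw [List.countP_cons, List.count_cons, List.length_cons]
    simp only [decide_eq_true_eq, beq_iff_eq]
    split_ifs <;> push_cast <;> omega

lemma countP_ne_ne {x a : Int} (hxa : x ≠ a) (p : List Int) :
    ((p.countP fun b => decide (a ≠ b ∧ x ≠ b)) : Int) = p.length - p.count a - p.count x := by
  induction p with
  | nil => simp
  | cons b t ih =>
    rw [List.countP_cons, List.count_cons, List.count_cons, List.length_cons]
    simp only [decide_eq_true_eq, beq_iff_eq]
    split_ifs <;> push_cast <;> omega

lemma countP_comm (a y : Int) (t : List Int) :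
    (t.countP fun b => decide (y ≠ b ∧ a ≠ b)) = (t.countP fun b => decide (a ≠ b ∧ y ≠ b)) := by
  induction t with
  | nil => rfl
  | cons b u ih =>
    simp only [List.countP_cons, ih]
    by_cases h1 : a = b <;> by_cases h2 : y = b <;> simp [h1, h2]

lemma pvD_append (p : List Int) (y : Int) :
    pvD (p ++ [y]) = pvD p + ((p.length : Int) - p.count y) := by
  induction p with
  | nil => simp [pvD]
  | cons a t ih =>
    simp only [List.cons_append, pvD, List.countP_append, ih, List.length_cons,
      List.count_cons, List.countP_cons, List.countP_nil, decide_eq_true_eq, beq_iff_eq]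
    split_ifs <;> push_cast <;> omega

lemma pvE_append (x : Int) (p : List Int) (y : Int) :
    pvE x (p ++ [y]) = pvE x p + (if x ≠ y then ((p.countP fun b => decide (y ≠ b ∧ x ≠ b)) : Int) else 0) := by
  induction p with
  | nil => simp [pvE]
  | cons a t ih =>
    simp only [List.cons_append, pvE, List.countP_append, ih, List.countP_cons,
      List.countP_nil, decide_eq_true_eq]
    split_ifs <;> push_cast <;> omega

lemma pvT_append (p : List Int) (y : Int) :
    pvT (p ++ [y]) = pvT p + pvE y p := by
  induction p with
  | nil => simp [pvT, pvE]
  | cons a t ih =>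
    simp only [List.cons_append, pvT, pvE, pvE_append, ih]
    rw [countP_comm]
    split_ifs <;> push_cast <;> omega

lemma pvE_eq (x : Int) (p : List Int) :
    pvE x p = pvD p - (p.count x : Int) * ((p.length : Int) - p.count x) := by
  induction p with
  | nil => simp [pvE, pvD]
  | cons a t ih =>
    by_cases h : x = a
    · subst h
      simp only [pvE, pvD]
      rw [if_neg (fun hh => hh rfl), ih, countP_ne, List.count_cons_self, List.length_cons]
      push_cast
      ring
    · simp only [pvE, pvD]
      rw [if_pos h, ih, countP_ne_ne h t, countP_ne,
        List.count_cons_of_ne (fun hh => h hh.symm), List.length_cons]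
      push_cast
      ring

-- ===== A-side: the three nested loops compute pvT =====

lemma inner_lemma (nums : List Int) (vi vj : Int) (a : Int) (ha : 0 ≤ a) (c : Int) :
    (PySem.List.pyRange (a) ((nums.length : Int)) 1).foldl
      (fun count k =>
        if vi ≠ vj ∧ vj ≠ PySem.List.pyGetD nums k 0 ∧ vi ≠ PySem.List.pyGetD nums k 0
        then count + 1 else count) c
    = c + (if vi ≠ vj then (((nums.drop a.toNat).countP fun b => decide (vj ≠ b ∧ vi ≠ b)) : Int) else 0) := by
  refine (PySem.List.foldl_pyRange_pyGetD' nums 0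
    (fun count v => if vi ≠ vj ∧ vj ≠ v ∧ vi ≠ v then count + 1 else count) c ha).trans ?_
  by_cases h : vi ≠ vj
  · have hfun : (fun (count : Int) v => if vi ≠ vj ∧ vj ≠ v ∧ vi ≠ v then count + 1 else count)
        = fun count v => if vj ≠ v ∧ vi ≠ v then count + 1 else count := by
      funext count v; simp [h]
    rw [hfun, PySem.List.foldl_ite_add_one, if_pos h]
  · have hfun : (fun (count : Int) v => if vi ≠ vj ∧ vj ≠ v ∧ vi ≠ v then count + 1 else count)
        = fun count _ => count := by
      funext count v; simp [h]
    rw [hfun, PySem.List.foldl_ignore, if_neg h, add_zero]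

lemma mid_lemma (nums : List Int) (vi : Int) :
    ∀ (m : Nat) (a : Int), 0 ≤ a → (((nums.length : Int)) - a).toNat = m → ∀ c : Int,
    (PySem.List.pyRange (a) ((nums.length : Int)) 1).foldl
      (fun count j =>
        (PySem.List.pyRange (j + 1) ((nums.length : Int)) 1).foldl
          (fun count k =>
            if vi ≠ PySem.List.pyGetD nums j 0 ∧
               PySem.List.pyGetD nums j 0 ≠ PySem.List.pyGetD nums k 0 ∧
               vi ≠ PySem.List.pyGetD nums k 0
            then count + 1 else count) count) c
    = c + pvE vi (nums.drop a.toNat) := by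
  intro m
  induction m with
  | zero =>
    intro a ha h0 c
    rw [PySem.List.pyRange_one_eq_nil (by omega), List.drop_eq_nil_of_le (by omega)]
    simp [pvE]
  | succ m ih =>
    intro a ha h0 c
    have hlt : a < (nums.length : Int) := by omega
    have hlt' : a.toNat < nums.length := by omega
    rw [PySem.List.pyRange_one_cons hlt]
    simp only [List.foldl_cons]
    rw [inner_lemma nums vi (PySem.List.pyGetD nums a 0) (a + 1) (by omega) c]
    rw [ih (a + 1) (by omega) (by omega)]
    have h1 : (a + 1).toNat = a.toNat + 1 := by omega
    rw [h1, PySem.List.pyGetD_eq_getElem nums 0 ha hlt]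
    conv_rhs => rw [List.drop_eq_getElem_cons hlt']
    simp only [pvE]
    ring

lemma outer_lemma (nums : List Int) :
    ∀ (m : Nat) (a : Int), 0 ≤ a → (((nums.length : Int)) - a).toNat = m → ∀ c : Int,
    (PySem.List.pyRange (a) ((nums.length : Int)) 1).foldl
      (fun count i =>
        (PySem.List.pyRange (i + 1) ((nums.length : Int)) 1).foldl
          (fun count j =>
            (PySem.List.pyRange (j + 1) ((nums.length : Int)) 1).foldl
              (fun count k =>
                if PySem.List.pyGetD nums i 0 ≠ PySem.List.pyGetD nums j 0 ∧
                   PySem.List.pyGetD nums j 0 ≠ PySem.List.pyGetD nums k 0 ∧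
                   PySem.List.pyGetD nums i 0 ≠ PySem.List.pyGetD nums k 0
                then count + 1 else count) count) count) c
    = c + pvT (nums.drop a.toNat) := by
  intro m
  induction m with
  | zero =>
    intro a ha h0 c
    rw [PySem.List.pyRange_one_eq_nil (by omega), List.drop_eq_nil_of_le (by omega)]
    simp [pvT]
  | succ m ih =>
    intro a ha h0 c
    have hlt : a < (nums.length : Int) := by omega
    have hlt' : a.toNat < nums.length := by omega
    rw [PySem.List.pyRange_one_cons hlt]
    simp only [List.foldl_cons]
    rw [mid_lemma nums (PySem.List.pyGetD nums a 0) m (a + 1) (by omega) (by omega)]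
    rw [ih (a + 1) (by omega) (by omega)]
    have h1 : (a + 1).toNat = a.toNat + 1 := by omega
    rw [h1, PySem.List.pyGetD_eq_getElem nums 0 ha hlt]
    conv_rhs => rw [List.drop_eq_getElem_cons hlt']
    simp only [pvT]
    ring

lemma A_eq (nums : List Int) : unequalTriplets nums = pvT nums := by
  unfold unequalTriplets
  simp only [PySem.List.len_eq]
  have h := outer_lemma nums nums.length 0 le_rfl (by omega) 0
  simpa using h

-- ===== B-side: the one-pass fold computes pvT =====

lemma B_loop (l : List Int) :
    ∀ (p : List Int) (cnt : PySem.Dict Int Int),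
    (∀ y : Int, cnt.getD y 0 = (p.count y : Int)) →
    (l.foldl
      (fun (st : Int × Int × Int × PySem.Dict Int Int) x =>
        let c := st.2.2.2.getD x 0
        (st.1 + (st.2.1 - c * (st.2.2.1 - c)),
         st.2.1 + (st.2.2.1 - c),
         st.2.2.1 + 1,
         st.2.2.2.insert x (c + 1)))
      (pvT p, pvD p, (p.length : Int), cnt)).1 = pvT (p ++ l) := by
  induction l with
  | nil => intro p cnt _; simp
  | cons x t ih =>
    intro p cnt hc
    have hstep : (pvT p + (pvD p - cnt.getD x 0 * ((p.length : Int) - cnt.getD x 0)),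
            pvD p + ((p.length : Int) - cnt.getD x 0),
            (p.length : Int) + 1,
            cnt.insert x (cnt.getD x 0 + 1))
        = ((pvT (p ++ [x]), pvD (p ++ [x]), ((p ++ [x]).length : Int),
           cnt.insert x ((p.count x : Int) + 1)) : Int × Int × Int × PySem.Dict Int Int) := by
      rw [hc x]
      simp only [Prod.mk.injEq, and_true]
      refine ⟨?_, ?_, ?_⟩
      · rw [pvT_append, pvE_eq]
      · rw [pvD_append]
      · simp
    rw [List.foldl_cons]
    show (t.foldl
      (fun (st : Int × Int × Int × PySem.Dict Int Int) x =>
        let c := st.2.2.2.getD x 0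
        (st.1 + (st.2.1 - c * (st.2.2.1 - c)),
         st.2.1 + (st.2.2.1 - c),
         st.2.2.1 + 1,
         st.2.2.2.insert x (c + 1)))
      (pvT p + (pvD p - cnt.getD x 0 * ((p.length : Int) - cnt.getD x 0)),
       pvD p + ((p.length : Int) - cnt.getD x 0),
       (p.length : Int) + 1,
       cnt.insert x (cnt.getD x 0 + 1))).1 = pvT (p ++ x :: t)
    rw [hstep]
    have hc' : ∀ y : Int, (cnt.insert x ((p.count x : Int) + 1)).getD y 0 = ((p ++ [x]).count y : Int) := by
      intro y
      rw [PySem.Dict.getD_insert]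
      by_cases h : y = x
      · subst h
        rw [if_pos rfl]
        simp [List.count_append]
      · rw [if_neg h, hc y]
        simp [List.count_append, Ne.symm h]
    have key := ih (p ++ [x]) (cnt.insert x ((p.count x : Int) + 1)) hc'
    rw [List.append_assoc, List.singleton_append] at key
    exact key

lemma B_eq (nums : List Int) : unequalTriplets_alt nums = pvT nums := by
  unfold unequalTriplets_alt
  have h := B_loop nums [] PySem.Dict.empty (fun y => by simp [PySem.Dict.getD_empty])
  simpa [pvT, pvD] using h

-- ===== VERDICT (by name: the statement is the Claim_ definition above) =====
theorem unequalTriplets_spec : Claim_equal_unequalTriplets := by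
  intro nums _
  show unequalTriplets nums = unequalTriplets_alt nums
  rw [A_eq, B_eq]
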